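-- pv_equiv track=rewrite | github.com/thewozn/LYD.IA | LYD.IA/lexical_analysis.py | analysis_simpletoken
-- ===== SOURCE A (Python) =====
-- def analysis_simpletoken(tokens, generated_tokens):
--     """List[String]*List[String]->String
--     Détecte les mots communs à une liste de tokens générés, et renvoie celui apparaissant
--     en dernier dans la phrase.
--     """
--     favourite = ""
--     for tkn in tokens:
--         if(tkn in generated_tokens):
--             if(tkn != "OUI" or tkn != "NON"):
--                 favourite = tkn
--             elif(favourite == ""):
--                 favourite = tkn
--     return favourite
-- ===== SOURCE B (Python) =====
-- def analysis_simpletoken(tokens, generated_tokens):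
--     for tkn in reversed(tokens):
--         if tkn in generated_tokens:
--             return tkn
--     return ""
-- ===== Notes on version B (the rewrite author's own statement) =====
-- stated objective: simpler
-- what changed: Replaces A's forward accumulate-and-overwrite loop (with an always-true OUI/NON test and a dead elif branch) by a backward scan over reversed(tokens) that returns the first match early.
import Mathlib
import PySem

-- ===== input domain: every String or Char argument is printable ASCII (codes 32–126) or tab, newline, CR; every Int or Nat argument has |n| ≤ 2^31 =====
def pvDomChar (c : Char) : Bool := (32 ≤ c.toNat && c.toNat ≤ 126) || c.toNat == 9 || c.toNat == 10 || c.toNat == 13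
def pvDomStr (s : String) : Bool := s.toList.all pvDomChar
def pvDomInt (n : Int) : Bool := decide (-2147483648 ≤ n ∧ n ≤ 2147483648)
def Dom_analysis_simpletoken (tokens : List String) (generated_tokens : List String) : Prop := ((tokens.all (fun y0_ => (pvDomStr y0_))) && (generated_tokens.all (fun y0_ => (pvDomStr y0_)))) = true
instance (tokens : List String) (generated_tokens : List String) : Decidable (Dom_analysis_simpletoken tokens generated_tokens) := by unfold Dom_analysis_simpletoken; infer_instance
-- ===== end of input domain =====

-- B replaces A's forward accumulate-and-overwrite loop by a backward scan with early exit; objective: simpler.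

-- ===== PORT A =====
def analysis_simpletoken (tokens : List String) (generated_tokens : List String) : String :=
  tokens.foldl (fun favourite tkn =>
    if generated_tokens.contains tkn then
      if tkn ≠ "OUI" ∨ tkn ≠ "NON" then tkn
      else if favourite = "" then tkn else favourite
    else favourite) ""

-- ===== PORT B =====
def analysis_simpletoken_altGo (tokens : List String) (generated_tokens : List String) : String :=
  match tokens with
  | [] => ""
  | tkn :: rest =>
      if generated_tokens.contains tkn then tkn
      else analysis_simpletoken_altGo rest generated_tokens

def analysis_simpletoken_alt (tokens : List String) (generated_tokens : List String) : String :=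
  analysis_simpletoken_altGo tokens.reverse generated_tokens

-- ===== PRECONDITION & SPEC =====
def Spec_analysis_simpletoken (tokens : List String) (generated_tokens : List String) (out : String) : Prop := out = analysis_simpletoken_alt tokens generated_tokens
instance (tokens : List String) (generated_tokens : List String) (out : String) : Decidable (Spec_analysis_simpletoken tokens generated_tokens out) := by unfold Spec_analysis_simpletoken; infer_instance

-- ===== CLAIM (what is proved, stated in full; the proofs are below) =====
def Claim_equal_analysis_simpletoken : Prop := ∀ (tokens : List String) (generated_tokens : List String), Dom_analysis_simpletoken tokens generated_tokens → Spec_analysis_simpletoken tokens generated_tokens (analysis_simpletoken tokens generated_tokens)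

-- ===== LEMMAS AND PROOFS =====

-- the inner OUI/NON condition of A is always true (a string cannot equal both)
theorem pv_inner_true (t : String) : (t ≠ "OUI" ∨ t ≠ "NON") := by
  by_cases h : t = "OUI"
  · right; simp [h]
  · left; exact h

theorem pv_go_eq_find (tokens g : List String) :
    analysis_simpletoken_altGo tokens g = ((tokens.find? (fun t => g.contains t)).getD "") := by
  induction tokens with
  | nil => rfl
  | cons t rest ih =>
    by_cases h : t ∈ g <;>
      simp [analysis_simpletoken_altGo, List.find?_cons, h, ih]

theorem pv_foldl_eq (g : List String) (tokens : List String) (fav : String) :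
    tokens.foldl (fun favourite tkn =>
      if g.contains tkn then
        if tkn ≠ "OUI" ∨ tkn ≠ "NON" then tkn
        else if favourite = "" then tkn else favourite
      else favourite) fav
    = ((tokens.reverse.find? (fun t => g.contains t)).getD fav) := by
  induction tokens generalizing fav with
  | nil => rfl
  | cons t rest ih =>
    simp only [List.foldl_cons, ih, List.reverse_cons, List.find?_append]
    cases hf : rest.reverse.find? (fun t => g.contains t) with
    | some v => simp
    | none =>
      by_cases h : t ∈ g <;>
        simp [List.find?_cons, h, pv_inner_true t]

-- ===== VERDICT (by name: the statement is the Claim_ definition above) =====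
theorem analysis_simpletoken_spec : Claim_equal_analysis_simpletoken := by
  intro tokens g _
  unfold Spec_analysis_simpletoken analysis_simpletoken analysis_simpletoken_alt
  rw [pv_foldl_eq, pv_go_eq_find]
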